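-- pv_equiv track=rewrite | github.com/EmmaDann/HexamerBias | thrashNsnippets/cellPrimerTemplTab.py | split_pt_dic
-- ===== SOURCE A (Python) =====
-- def split_pt_dic(templDic):
--     '''
--     Split dictionary of reads:[template,primer] by cell.
--     Output: dictionary of pt tables, one for each cell with more than 10k aligned reads
--     '''
--     cellDic={}
--     for name,seqs in templDic.items():
--         cell = name.split(':')[-1]
--         if cell not in cellDic.keys():
--             cellDic[cell]={}
--         cellDic[cell][name]=seqs
--     return(cellDic)
-- ===== SOURCE B (Python) =====
-- def split_pt_dic(templDic):
--     '''
--     Split dictionary of reads:[template,primer] by cell.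
--     Output: dictionary of pt tables, one for each cell with more than 10k aligned reads
--     '''
--     cells = dict.fromkeys(name.split(':')[-1] for name in templDic)
--     return {cell: {name: seqs for name, seqs in templDic.items()
--                    if name.split(':')[-1] == cell}
--             for cell in cells}
-- ===== Notes on version B (the rewrite author's own statement) =====
-- stated objective: alternative
-- what changed: Replaces A's single-pass incremental hash-bucketing (create-bucket-then-assign per read) with a two-pass scheme: first dedup the cell keys in first-occurrence order, then build each cell's inner dict by a filtering comprehension over the items.
import Mathlib
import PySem

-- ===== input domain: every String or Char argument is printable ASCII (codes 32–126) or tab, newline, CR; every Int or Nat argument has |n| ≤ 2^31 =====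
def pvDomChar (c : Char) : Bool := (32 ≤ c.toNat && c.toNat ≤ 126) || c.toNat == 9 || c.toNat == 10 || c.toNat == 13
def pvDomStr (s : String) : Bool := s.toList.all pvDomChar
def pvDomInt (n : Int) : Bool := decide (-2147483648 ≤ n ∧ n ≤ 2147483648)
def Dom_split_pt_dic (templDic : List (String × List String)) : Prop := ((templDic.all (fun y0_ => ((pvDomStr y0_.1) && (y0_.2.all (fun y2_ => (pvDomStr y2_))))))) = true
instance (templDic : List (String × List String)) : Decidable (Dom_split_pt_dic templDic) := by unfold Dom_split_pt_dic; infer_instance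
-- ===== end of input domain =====

-- B re-groups by a dedup-cells pass followed by one filtering comprehension per cell,
-- instead of A's one-pass incremental bucketing; equal output (same nested insertion order).

-- name.split(':')[-1] — shared key expression of both Pythons (':' ≠ "" so split? is some;
-- the split list is never empty so [-1] never raises: the getD defaults are unreachable)
def pvCell (name : String) : String :=
  (PySem.List.pyGet? ((PySem.Str.split? name ":").getD []) (-1)).getD ""

-- ===== PORT A =====
def split_pt_dic (templDic : List (String × List String)) : List (String × List (String × List String)) :=
  let cellDic : PySem.Dict String (PySem.Dict String (List String)) :=
    templDic.foldl (fun cellDic p =>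
      let cell := pvCell p.1
      -- if cell not in cellDic.keys(): cellDic[cell] = {}
      let cellDic := if cellDic.contains cell then cellDic else cellDic.insert cell PySem.Dict.empty
      -- cellDic[cell][name] = seqs
      cellDic.insert cell ((cellDic.getD cell PySem.Dict.empty).insert p.1 p.2))
      PySem.Dict.empty
  cellDic.items.map (fun q => (q.1, q.2.items))

-- ===== PORT B =====
def split_pt_dic_alt (templDic : List (String × List String)) : List (String × List (String × List String)) :=
  -- cells = dict.fromkeys(name.split(':')[-1] for name in templDic)
  let cells := PySem.List.dedup (templDic.map (fun p => pvCell p.1))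
  -- {cell: {name: seqs for name, seqs in templDic.items() if name.split(':')[-1] == cell} for cell in cells}
  cells.map (fun c =>
    (c, ((templDic.filter (fun p => pvCell p.1 == c)).foldl
          (fun d p => d.insert p.1 p.2) PySem.Dict.empty).items))

-- ===== PRECONDITION & SPEC =====
def Spec_split_pt_dic (templDic : List (String × List String)) (out : List (String × List (String × List String))) : Prop := out = split_pt_dic_alt templDic
instance (templDic : List (String × List String)) (out : List (String × List (String × List String))) : Decidable (Spec_split_pt_dic templDic out) := by unfold Spec_split_pt_dic; infer_instance

-- ===== CLAIM (what is proved, stated in full; the proofs are below) =====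
def Claim_equal_split_pt_dic : Prop := ∀ (templDic : List (String × List String)), Dom_split_pt_dic templDic → Spec_split_pt_dic templDic (split_pt_dic templDic)

-- ===== LEMMAS AND PROOFS =====

-- A's loop body (setdefault-to-{} then item assignment) is exactly Dict.modify
theorem stepA_eq_modify (d : PySem.Dict String (PySem.Dict String (List String)))
    (p : String × List String) :
    (let cell := pvCell p.1
     let d' := if d.contains cell then d else d.insert cell PySem.Dict.empty
     d'.insert cell ((d'.getD cell PySem.Dict.empty).insert p.1 p.2))
      = d.modify (pvCell p.1) PySem.Dict.empty (fun inner => inner.insert p.1 p.2) := by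
  by_cases h : d.contains (pvCell p.1)
  · simp [h, PySem.Dict.modify]
  · simp [h, PySem.Dict.modify, PySem.Dict.insert_insert_self, PySem.Dict.getD_insert_self,
      PySem.Dict.getD_of_not_contains d PySem.Dict.empty (by simpa using h)]

-- a modify-at-key loop, read back at c, is a fold over the items whose key is c
theorem getD_foldl_modify_key {κ ν α : Type} [BEq κ] [LawfulBEq κ] [DecidableEq κ]
    (l : List α) (key : α → κ) (g : α → ν → ν) (d : PySem.Dict κ ν) (d0 : ν) (c : κ) :
    (l.foldl (fun d x => d.modify (key x) d0 (g x)) d).getD c d0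
      = (l.filter (fun x => key x == c)).foldl (fun v x => g x v) (d.getD c d0) := by
  induction l generalizing d with
  | nil => rfl
  | cons x xs ih =>
    simp only [List.foldl_cons, List.filter_cons]
    by_cases h : key x = c
    · simp [ih, h]
    · simp [ih, PySem.Dict.getD_modify, h, Ne.symm h]

-- ===== VERDICT (by name: the statement is the Claim_ definition above) =====
theorem split_pt_dic_spec : Claim_equal_split_pt_dic := by
  intro l _
  unfold Spec_split_pt_dic split_pt_dic split_pt_dic_alt
  rw [PySem.List.foldl_congr_mem l _
      (fun (d : PySem.Dict String (PySem.Dict String (List String))) p =>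
        d.modify (pvCell p.1) PySem.Dict.empty (fun inner => inner.insert p.1 p.2))
      PySem.Dict.empty (fun d p _ => stepA_eq_modify d p)]
  dsimp only
  set F := l.foldl (fun (d : PySem.Dict String (PySem.Dict String (List String))) p =>
      d.modify (pvCell p.1) PySem.Dict.empty (fun inner => inner.insert p.1 p.2))
      PySem.Dict.empty with hF
  have hnd : F.keys.Nodup :=
    PySem.Dict.nodup_keys_foldl_modify_key l (fun p => pvCell p.1) PySem.Dict.empty
      (fun _ p inner => inner.insert p.1 p.2) PySem.Dict.empty (by simp)
  have hkeys : F.keys = PySem.List.dedup (l.map (fun p => pvCell p.1)) := by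
    rw [hF, PySem.Dict.keys_foldl_modify_key l (fun p => pvCell p.1) PySem.Dict.empty
      (fun _ p inner => inner.insert p.1 p.2) PySem.Dict.empty]
    simp [PySem.Set.update, PySem.Set.ofList, PySem.Set.empty]
  rw [PySem.Dict.items_eq_map_keys F hnd PySem.Dict.empty, hkeys, List.map_map]
  refine List.map_congr_left (fun c _ => ?_)
  have := getD_foldl_modify_key l (fun p => pvCell p.1)
      (fun p (inner : PySem.Dict String (List String)) => inner.insert p.1 p.2)
      PySem.Dict.empty PySem.Dict.empty c
  simp only [Function.comp_apply, hF, this, PySem.Dict.getD_empty]
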